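-- pv_equiv track=rewrite | github.com/jackshine/pycharm | uclbrt/auto_test/meizhu/test.py | generate_num
-- ===== SOURCE A (Python) =====
-- def generate_num(min_num, build_num_list):
--     # 查找楼栋编号的最小值
--     num = min_num + 1
--     if num not in build_num_list:
--         return num
--     elif num == 255:
--         raise '超出范围'
--     else:
--         return generate_num(num, build_num_list)
-- ===== SOURCE B (Python) =====
-- def generate_num(min_num, build_num_list):
--     # scan the sorted distinct building numbers once instead of recursing
--     num = min_num + 1
--     for v in sorted(set(build_num_list)):
--         if v < num:
--             continue
--         if v > num:
--             break
--         if num == 255: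
--             raise '超出范围'
--         num += 1
--     return num
-- ===== Notes on version B (the rewrite author's own statement) =====
-- stated objective: alternative
-- what changed: Replaces the unbounded recursion re-scanning the whole list at every step with a single pass over sorted(set(build_num_list)): consecutive present values advance the candidate, the first gap returns it.
import Mathlib
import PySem

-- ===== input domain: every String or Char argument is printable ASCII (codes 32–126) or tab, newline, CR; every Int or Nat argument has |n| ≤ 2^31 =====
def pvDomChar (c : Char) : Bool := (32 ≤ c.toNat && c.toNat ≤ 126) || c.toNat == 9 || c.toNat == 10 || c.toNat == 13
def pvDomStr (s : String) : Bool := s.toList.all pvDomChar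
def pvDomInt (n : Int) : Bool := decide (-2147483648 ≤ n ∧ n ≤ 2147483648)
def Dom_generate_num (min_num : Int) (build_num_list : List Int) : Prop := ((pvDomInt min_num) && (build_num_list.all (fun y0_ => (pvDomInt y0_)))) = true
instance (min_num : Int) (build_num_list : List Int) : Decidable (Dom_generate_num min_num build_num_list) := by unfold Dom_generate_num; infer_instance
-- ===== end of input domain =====

-- B replaces A's unbounded recursion (which re-scans the list at each step) by a single scan
-- of the sorted distinct building numbers; equivalence is proved on Pre_, the inputs where A returns.


-- ===== PORT A =====
-- termination helper for A's recursion: the recursive call consumes one list element above min_num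
theorem pvA_measure_lt (min_num : Int) (bl : List Int) (h : (min_num + 1) ∈ bl) :
    (bl.filter (fun x => decide (min_num + 1 < x))).length
      < (bl.filter (fun x => decide (min_num < x))).length := by
  induction bl with
  | nil => cases h
  | cons a t ih =>
    rcases List.mem_cons.mp h with rfl | ht
    · have hs : (t.filter (fun x => decide (min_num + 1 < x))).Sublist
          (t.filter (fun x => decide (min_num < x))) := by
        apply List.monotone_filter_right
        intro x hx
        simp only [decide_eq_true_eq] at hx ⊢
        omega
      have hle := hs.length_le
      simp only [List.filter_cons]
      simp only [show (decide (min_num + 1 < min_num + 1)) = false by simp,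
        show (decide (min_num < min_num + 1)) = true by simp]
      simp
      omega
    · have := ih ht
      simp only [List.filter_cons]
      by_cases hc : min_num + 1 < a
      · have hc' : min_num < a := by omega
        simp [hc, hc']; omega
      · by_cases hc2 : min_num < a
        · simp [hc, hc2]; omega
        · simp [hc, hc2]; omega

-- literal port of A; in the branch where Python raises '超出范围' it returns 0 (excluded by Pre_)
def generate_num (min_num : Int) (build_num_list : List Int) : Int :=
  let num := min_num + 1
  if num ∉ build_num_list then num
  else if num = 255 then 0  -- Python: raise '超出范围' (a TypeError); outside Pre_
  else generate_num num build_num_list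
termination_by (build_num_list.filter (fun x => decide (min_num < x))).length
decreasing_by
  exact pvA_measure_lt min_num build_num_list (by simpa using ‹¬ (min_num + 1) ∉ build_num_list›)

-- ===== PORT B =====
-- the for-loop of Source B over sorted(set(build_num_list)) with accumulator num
def pvScan (num : Int) : List Int → Int
  | [] => num
  | v :: rest =>
    if v < num then pvScan num rest            -- continue
    else if num < v then num                   -- break, then return num
    else if num = 255 then 0                   -- Python: raise '超出范围' (a TypeError); outside Pre_
    else pvScan (num + 1) rest

def generate_num_alt (min_num : Int) (build_num_list : List Int) : Int :=
  pvScan (min_num + 1) (PySem.List.sorted (PySem.Set.ofList build_num_list) (fun x => x) false)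

-- ===== PRECONDITION & SPEC =====
-- Pre_ excludes exactly the inputs on which the Python A raises '超出范围': min_num below 255 with
-- every integer of (min_num, 255] present in build_num_list (the first missing number above
-- min_num, which is at most min_num + 1 + length, would exceed 255).
def Pre_generate_num (min_num : Int) (build_num_list : List Int) : Prop :=
  255 ≤ min_num ∨ ∃ k ∈ List.range (build_num_list.length + 1),
    (min_num + 1 + (k : Int) ≤ 255 ∧ (min_num + 1 + (k : Int)) ∉ build_num_list)
instance (min_num : Int) (build_num_list : List Int) : Decidable (Pre_generate_num min_num build_num_list) := by unfold Pre_generate_num; infer_instance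

def pvWitness_generate_num : Int × List Int := (3, [4, 4, 6])

def Spec_generate_num (min_num : Int) (build_num_list : List Int) (out : Int) : Prop := out = generate_num_alt min_num build_num_list
instance (min_num : Int) (build_num_list : List Int) (out : Int) : Decidable (Spec_generate_num min_num build_num_list out) := by unfold Spec_generate_num; infer_instance

-- ===== CLAIM (what is proved, stated in full; the proofs are below) =====
def Claim_equal_generate_num : Prop := ∀ (min_num : Int) (build_num_list : List Int), Dom_generate_num min_num build_num_list → Pre_generate_num min_num build_num_list → Spec_generate_num min_num build_num_list (generate_num min_num build_num_list)

-- ===== LEMMAS AND PROOFS =====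

theorem genA_char (min_num : Int) (bl : List Int)
    (H : min_num + 1 ≤ 255 → ∃ n, min_num + 1 ≤ n ∧ n ≤ 255 ∧ n ∉ bl) :
    min_num < generate_num min_num bl ∧ generate_num min_num bl ∉ bl ∧
      ∀ k, min_num < k → k < generate_num min_num bl → k ∈ bl := by
  induction min_num using generate_num.induct (build_num_list := bl) with
  | case1 m num h =>
    rw [generate_num]
    split_ifs with h1
    · exact absurd h1 h
    · exact ⟨by omega, h1, fun k hk1 hk2 => absurd hk2 (by omega)⟩
  | case2 m num h h255 =>
    exfalso
    have hmem : (m + 1) ∈ bl := not_not.mp h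
    have h255' : m + 1 = 255 := h255
    obtain ⟨n, hn1, hn2, hn3⟩ := H (by omega)
    have hn4 : n = m + 1 := by omega
    exact hn3 (hn4 ▸ hmem)
  | case3 m num h h255 ih =>
    have hmem : (m + 1) ∈ bl := not_not.mp h
    rw [generate_num]
    split_ifs
    have H' : m + 1 + 1 ≤ 255 → ∃ n, m + 1 + 1 ≤ n ∧ n ≤ 255 ∧ n ∉ bl := by
      intro hle
      obtain ⟨n, hn1, hn2, hn3⟩ := H (by omega)
      refine ⟨n, ?_, hn2, hn3⟩
      rcases eq_or_lt_of_le hn1 with heq | hlt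
      · exact absurd (heq ▸ hmem) hn3
      · omega
    obtain ⟨r1, r2, r3⟩ := ih H'
    have r1' : m + 1 < generate_num (m + 1) bl := r1
    have r3' : ∀ k, m + 1 < k → k < generate_num (m + 1) bl → k ∈ bl := r3
    refine ⟨by omega, r2, ?_⟩
    intro k hk1 hk2
    rcases eq_or_lt_of_le (by omega : m + 1 ≤ k) with heq | hlt
    · exact heq ▸ hmem
    · exact r3' k hlt hk2

-- characterisation of B's scan over a strictly sorted list of the distinct elements of bl
theorem pvScan_char (s : List Int) (bl : List Int) (num : Int)
    (hsort : s.Pairwise (· < ·))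
    (hsub : ∀ v ∈ s, v ∈ bl)
    (hcov : ∀ x ∈ bl, num ≤ x → x ∈ s)
    (H : num ≤ 255 → ∃ n, num ≤ n ∧ n ≤ 255 ∧ n ∉ bl) :
    num ≤ pvScan num s ∧ pvScan num s ∉ bl ∧
      ∀ k, num ≤ k → k < pvScan num s → k ∈ bl := by
  induction s generalizing num with
  | nil =>
    simp only [pvScan]
    exact ⟨le_refl _, fun hmem => List.not_mem_nil (hcov _ hmem (le_refl _)),
      fun k h1 h2 => absurd h1 (by omega)⟩
  | cons v rest ih =>
    rcases List.pairwise_cons.mp hsort with ⟨hvlt, hrest⟩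
    by_cases h1 : v < num
    · rw [pvScan]
      rw [if_pos h1]
      have hcov' : ∀ x ∈ bl, num ≤ x → x ∈ rest := by
        intro x hx hle
        rcases List.mem_cons.mp (hcov x hx hle) with rfl | hr
        · omega
        · exact hr
      exact ih num hrest (fun x hx => hsub x (List.mem_cons_of_mem _ hx)) hcov' H
    · by_cases h2 : num < v
      · rw [pvScan, if_neg h1, if_pos h2]
        refine ⟨le_refl _, fun hmem => ?_, fun k hk1 hk2 => absurd hk1 (by omega)⟩
        rcases List.mem_cons.mp (hcov _ hmem (le_refl _)) with heq | hmem'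
        · omega
        · exact absurd (hvlt _ hmem') (by omega)
      · have hveq : v = num := by omega
        subst hveq
        have hvbl : v ∈ bl := hsub v List.mem_cons_self
        have hv255 : ¬ (v = 255) := by
          intro heq
          obtain ⟨n, hn1, hn2, hn3⟩ := H (by omega)
          have hn4 : n = v := by omega
          exact hn3 (hn4 ▸ hvbl)
        rw [pvScan, if_neg h1, if_neg h2, if_neg hv255]
        have H' : v + 1 ≤ 255 → ∃ n, v + 1 ≤ n ∧ n ≤ 255 ∧ n ∉ bl := by
          intro hle
          obtain ⟨n, hn1, hn2, hn3⟩ := H (by omega)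
          refine ⟨n, ?_, hn2, hn3⟩
          rcases eq_or_lt_of_le hn1 with heq | hlt
          · exact absurd (heq ▸ hvbl) hn3
          · omega
        have hcov' : ∀ x ∈ bl, v + 1 ≤ x → x ∈ rest := by
          intro x hx hle
          rcases List.mem_cons.mp (hcov x hx (by omega)) with rfl | hr
          · omega
          · exact hr
        obtain ⟨r1, r2, r3⟩ := ih (v + 1) hrest (fun x hx => hsub x (List.mem_cons_of_mem _ hx)) hcov' H'
        refine ⟨by omega, r2, ?_⟩
        intro k hk1 hk2
        rcases eq_or_lt_of_le hk1 with heq | hlt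
        · exact heq ▸ hvbl
        · exact r3 k (by omega) hk2

-- ===== VERDICT (by name: the statement is the Claim_ definition above) =====
theorem generate_num_spec : Claim_equal_generate_num := by
  intro min_num bl _ hpre
  unfold Spec_generate_num generate_num_alt
  have H : min_num + 1 ≤ 255 → ∃ n, min_num + 1 ≤ n ∧ n ≤ 255 ∧ n ∉ bl := by
    intro hle
    rcases hpre with h | ⟨k, _, hk1, hk2⟩
    · omega
    · exact ⟨min_num + 1 + k, by omega, hk1, hk2⟩
  obtain ⟨a1, a2, a3⟩ := genA_char min_num bl H
  set s := PySem.List.sorted (PySem.Set.ofList bl) (fun x => x) false with hs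
  have hsort : s.Pairwise (· < ·) := PySem.List.sorted_ofList_pairwise_lt bl
  have hsub : ∀ v ∈ s, v ∈ bl := by
    intro v hv
    rw [hs, PySem.List.mem_sorted] at hv
    exact (PySem.Set.mem_ofList bl v).mp hv
  have hcov : ∀ x ∈ bl, min_num + 1 ≤ x → x ∈ s := by
    intro x hx _
    rw [hs, PySem.List.mem_sorted]
    exact (PySem.Set.mem_ofList bl x).mpr hx
  obtain ⟨b1, b2, b3⟩ := pvScan_char s bl (min_num + 1) hsort hsub hcov H
  by_contra hne
  rcases lt_or_gt_of_ne hne with hlt | hgt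
  · exact a2 (b3 _ (by omega) (by omega))
  · exact b2 (a3 _ (by omega) (by omega))
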